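-- pv_equiv track=rewrite | github.com/hostallfile4/final_updated | ai/agents/education/learning_agent.py | _suggest_next_topics
-- ===== SOURCE A (Python) =====
-- from typing import Dict, List
--
-- def _suggest_next_topics(current_topic: str, data: Dict) -> List[str]:
--     level = data.get("level", "beginner")
--     completed = data.get("completed_topics", [])
--
--     # Example topic progression
--     progressions = {
--         "programming": ["basics", "functions", "objects", "algorithms"],
--         "math": ["arithmetic", "algebra", "calculus", "statistics"],
--         "science": ["physics", "chemistry", "biology", "advanced"]
--     }
--
--     current_progression = None
--     for subject, topics in progressions.items():
--         if current_topic in topics: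
--             current_progression = topics
--             break
--
--     if current_progression:
--         current_index = current_progression.index(current_topic)
--         return current_progression[current_index + 1:current_index + 3]
--
--     return ["Related Topic 1", "Related Topic 2"]
-- ===== SOURCE B (Python) =====
-- from typing import Dict, List
--
-- def _suggest_next_topics(current_topic: str, data: Dict) -> List[str]:
--     level = data.get("level", "beginner")
--     completed = data.get("completed_topics", [])
--
--     progressions = {
--         "programming": ["basics", "functions", "objects", "algorithms"],
--         "math": ["arithmetic", "algebra", "calculus", "statistics"],
--         "science": ["physics", "chemistry", "biology", "advanced"]
--     }
--
--     # Build an inverted index once: topic -> the next two topics in its progression.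
--     next_map = {}
--     for topics in progressions.values():
--         for i, t in enumerate(topics):
--             next_map[t] = topics[i + 1:i + 3]
--
--     return next_map.get(current_topic, ["Related Topic 1", "Related Topic 2"])
-- ===== Notes on version B (the rewrite author's own statement) =====
-- stated objective: idiomatic
-- what changed: B precomputes an inverted dict mapping every topic to its next-two slice and answers by a single dict lookup with a default, instead of scanning progressions for the containing list and then calling .index and slicing.
import Mathlib
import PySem

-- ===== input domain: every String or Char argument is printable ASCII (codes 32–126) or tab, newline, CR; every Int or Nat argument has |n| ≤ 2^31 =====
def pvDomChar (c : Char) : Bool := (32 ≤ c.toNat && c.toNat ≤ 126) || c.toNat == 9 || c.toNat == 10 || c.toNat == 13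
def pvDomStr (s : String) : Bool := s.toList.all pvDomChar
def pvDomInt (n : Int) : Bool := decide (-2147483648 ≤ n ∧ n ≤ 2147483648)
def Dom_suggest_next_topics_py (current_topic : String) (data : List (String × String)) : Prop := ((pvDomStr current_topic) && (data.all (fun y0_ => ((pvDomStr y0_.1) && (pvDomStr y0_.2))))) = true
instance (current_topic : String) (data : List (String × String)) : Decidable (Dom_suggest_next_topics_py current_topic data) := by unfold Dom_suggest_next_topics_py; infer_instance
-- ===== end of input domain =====

-- B replaces A's scan-then-.index with a precomputed topic → next-two-topics dict and a single lookup (idiomatic; same cost on the fixed tables).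

-- ===== PORT A =====
-- the for-loop with break: the first progression list containing t, or none
def pvFindProg (t : String) : List (String × List String) → Option (List String)
  | [] => none
  | (_, topics) :: rest => if t ∈ topics then some topics else pvFindProg t rest

def suggest_next_topics_py (current_topic : String) (data : List (String × String)) : List String :=
  let _level := PySem.Dict.getD (PySem.Dict.ofList data) "level" "beginner"
  -- data.get("completed_topics", []): unused; Python's default [] is of another type, so only the lookup is ported
  let _completed := PySem.Dict.get? (PySem.Dict.ofList data) "completed_topics"
  let progressions : List (String × List String) :=
    [("programming", ["basics", "functions", "objects", "algorithms"]),
     ("math", ["arithmetic", "algebra", "calculus", "statistics"]),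
     ("science", ["physics", "chemistry", "biology", "advanced"])]
  match pvFindProg current_topic progressions with
  | some current_progression =>
    match PySem.List.index? current_progression current_topic with
    | some i => PySem.List.slice current_progression (some ((i : Int) + 1)) (some ((i : Int) + 3))
    | none => []  -- unreachable: .index never raises here since current_topic ∈ current_progression
  | none => ["Related Topic 1", "Related Topic 2"]

-- ===== PORT B =====
def suggest_next_topics_py_alt (current_topic : String) (data : List (String × String)) : List String :=
  let _level := PySem.Dict.getD (PySem.Dict.ofList data) "level" "beginner"
  let _completed := PySem.Dict.get? (PySem.Dict.ofList data) "completed_topics"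
  let progressions : List (String × List String) :=
    [("programming", ["basics", "functions", "objects", "algorithms"]),
     ("math", ["arithmetic", "algebra", "calculus", "statistics"]),
     ("science", ["physics", "chemistry", "biology", "advanced"])]
  let next_map : PySem.Dict String (List String) :=
    progressions.foldl (fun d p =>
      (PySem.List.enumerate p.2).foldl (fun d it =>
        PySem.Dict.insert d it.2 (PySem.List.slice p.2 (some (it.1 + 1)) (some (it.1 + 3)))) d)
      PySem.Dict.empty
  PySem.Dict.getD next_map current_topic ["Related Topic 1", "Related Topic 2"]

-- ===== PRECONDITION & SPEC =====
def Spec_suggest_next_topics_py (current_topic : String) (data : List (String × String)) (out : List String) : Prop := out = suggest_next_topics_py_alt current_topic data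
instance (current_topic : String) (data : List (String × String)) (out : List String) : Decidable (Spec_suggest_next_topics_py current_topic data out) := by unfold Spec_suggest_next_topics_py; infer_instance

-- ===== CLAIM (what is proved, stated in full; the proofs are below) =====
def Claim_equal_suggest_next_topics_py : Prop := ∀ (current_topic : String) (data : List (String × String)), Dom_suggest_next_topics_py current_topic data → Spec_suggest_next_topics_py current_topic data (suggest_next_topics_py current_topic data)

-- ===== LEMMAS AND PROOFS =====

-- ===== VERDICT (by name: the statement is the Claim_ definition above) =====
theorem suggest_next_topics_py_spec : Claim_equal_suggest_next_topics_py := by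
  intro t data _
  unfold Spec_suggest_next_topics_py
  by_cases h1 : t = "basics"; · subst h1; rfl
  by_cases h2 : t = "functions"; · subst h2; rfl
  by_cases h3 : t = "objects"; · subst h3; rfl
  by_cases h4 : t = "algorithms"; · subst h4; rfl
  by_cases h5 : t = "arithmetic"; · subst h5; rfl
  by_cases h6 : t = "algebra"; · subst h6; rfl
  by_cases h7 : t = "calculus"; · subst h7; rfl
  by_cases h8 : t = "statistics"; · subst h8; rfl
  by_cases h9 : t = "physics"; · subst h9; rfl
  by_cases h10 : t = "chemistry"; · subst h10; rfl
  by_cases h11 : t = "biology"; · subst h11; rfl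
  by_cases h12 : t = "advanced"; · subst h12; rfl
  simp [suggest_next_topics_py, suggest_next_topics_py_alt, pvFindProg,
        PySem.Dict.getD, PySem.Dict.get?, PySem.Dict.insert, PySem.Dict.empty,
        PySem.List.enumerate, List.find?, h1, h2, h3, h4, h5, h6, h7, h8, h9, h10, h11, h12,
        beq_false_of_ne (Ne.symm h1), beq_false_of_ne (Ne.symm h2), beq_false_of_ne (Ne.symm h3),
        beq_false_of_ne (Ne.symm h4), beq_false_of_ne (Ne.symm h5), beq_false_of_ne (Ne.symm h6),
        beq_false_of_ne (Ne.symm h7), beq_false_of_ne (Ne.symm h8), beq_false_of_ne (Ne.symm h9),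
        beq_false_of_ne (Ne.symm h10), beq_false_of_ne (Ne.symm h11), beq_false_of_ne (Ne.symm h12)]
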